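-- pv_equiv track=rewrite | github.com/Markmahugu/RDBMS-challenge | backend/app/database.py | _handle_group_by
-- ===== SOURCE A (Python) =====
-- from typing import Dict, List, Any, Optional
--
-- def _handle_group_by(data: List[dict], group_col: str) -> List[dict]:
--     """Handle GROUP BY clause"""
--     if not data:
--         return data
--
--     # Group data by the specified column
--     groups = {}
--     for row in data:
--         key = row.get(group_col)
--         if key not in groups:
--             groups[key] = []
--         groups[key].append(row)
--
--     # For now, return one row per group (simplified)
--     # In a full implementation, this would work with aggregation functions
--     result = []
--     for key, group_rows in groups.items():
--         if group_rows:
--             result.append(group_rows[0])  # Take first row of each group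
--
--     return result
-- ===== SOURCE B (Python) =====
-- def _handle_group_by(data, group_col):
--     """Return the first row of each group in one pass: a set of seen keys
--     replaces the dict-of-lists build plus the second loop over groups."""
--     if not data:
--         return data
--     seen = set()
--     result = []
--     for row in data:
--         key = row.get(group_col)
--         if key not in seen:
--             seen.add(key)
--             result.append(row)
--     return result
-- ===== Notes on version B (the rewrite author's own statement) =====
-- stated objective: simpler
-- what changed: Single pass keeping only a set of seen keys and appending each group's first row directly, instead of building a dict of full per-group row lists and then a second loop taking each group's head.
import Mathlib
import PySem

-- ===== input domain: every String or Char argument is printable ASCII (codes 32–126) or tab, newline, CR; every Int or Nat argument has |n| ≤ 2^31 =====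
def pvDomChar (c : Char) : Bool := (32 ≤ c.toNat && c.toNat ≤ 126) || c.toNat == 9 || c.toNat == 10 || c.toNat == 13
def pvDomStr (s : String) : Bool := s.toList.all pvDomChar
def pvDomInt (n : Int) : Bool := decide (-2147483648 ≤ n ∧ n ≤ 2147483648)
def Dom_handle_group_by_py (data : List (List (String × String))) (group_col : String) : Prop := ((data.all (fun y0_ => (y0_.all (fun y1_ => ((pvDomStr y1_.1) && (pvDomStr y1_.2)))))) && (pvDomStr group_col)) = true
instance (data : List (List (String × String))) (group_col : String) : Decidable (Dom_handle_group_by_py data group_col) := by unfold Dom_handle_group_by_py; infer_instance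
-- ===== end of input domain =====

-- B replaces A's dict-of-lists build + second loop over groups by a single pass
-- with a set of seen keys, appending each group's first row directly (simpler).


-- ===== PORT A =====
-- literal port of A: build a dict key ↦ list of rows, then one row per group
def handle_group_by_py (data : List (List (String × String))) (group_col : String) : List (List (String × String)) :=
  if data = [] then data
  else
    let groups : PySem.Dict (Option String) (List (List (String × String))) :=
      data.foldl
        (fun g row =>
          let key := List.lookup group_col row
          let g1 := if g.contains key then g else g.insert key []
          g1.modify key [] (fun rows => rows ++ [row]))
        PySem.Dict.empty
    groups.items.foldl
      (fun result kv =>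
        match kv.2 with
        | [] => result
        | r :: _ => result ++ [r])
      []

-- ===== PORT B =====
-- literal port of B: one pass, a set of seen keys, append first row per key
def handle_group_by_py_alt (data : List (List (String × String))) (group_col : String) : List (List (String × String)) :=
  if data = [] then data
  else
    (data.foldl
      (fun (st : PySem.Set (Option String) × List (List (String × String))) row =>
        let key := List.lookup group_col row
        if st.1.contains key then st
        else (st.1.add key, st.2 ++ [row]))
      (PySem.Set.empty, [])).2

-- ===== PRECONDITION & SPEC =====
def Spec_handle_group_by_py (data : List (List (String × String))) (group_col : String) (out : List (List (String × String))) : Prop := out = handle_group_by_py_alt data group_col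
instance (data : List (List (String × String))) (group_col : String) (out : List (List (String × String))) : Decidable (Spec_handle_group_by_py data group_col out) := by unfold Spec_handle_group_by_py; infer_instance

-- ===== CLAIM (what is proved, stated in full; the proofs are below) =====
def Claim_equal_handle_group_by_py : Prop := ∀ (data : List (List (String × String))) (group_col : String), Dom_handle_group_by_py data group_col → Spec_handle_group_by_py data group_col (handle_group_by_py data group_col)

-- ===== LEMMAS AND PROOFS =====

-- A's grouping step and second-loop fold, and B's step, as named functions
def pvAStep (group_col : String)
    (g : PySem.Dict (Option String) (List (List (String × String))))
    (row : List (String × String)) :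
    PySem.Dict (Option String) (List (List (String × String))) :=
  let key := List.lookup group_col row
  let g1 := if g.contains key then g else g.insert key []
  g1.modify key [] (fun rows => rows ++ [row])

def pvFinStep (result : List (List (String × String)))
    (kv : Option String × List (List (String × String))) :
    List (List (String × String)) :=
  match kv.2 with
  | [] => result
  | r :: _ => result ++ [r]

def pvFin (items : List (Option String × List (List (String × String)))) :
    List (List (String × String)) :=
  items.foldl pvFinStep []

def pvBStep (group_col : String)
    (st : PySem.Set (Option String) × List (List (String × String)))
    (row : List (String × String)) :
    PySem.Set (Option String) × List (List (String × String)) :=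
  let key := List.lookup group_col row
  if st.1.contains key then st
  else (st.1.add key, st.2 ++ [row])

-- one A-step on a fresh key appends (key, [row]) to the items
lemma pvAStep_items_fresh (group_col : String) (g : PySem.Dict (Option String) (List (List (String × String))))
    (row : List (String × String)) (h : g.contains (List.lookup group_col row) = false) :
    (pvAStep group_col g row).items = g.items ++ [(List.lookup group_col row, [row])] := by
  simp only [pvAStep, PySem.Dict.modify, h, Bool.false_eq_true, if_false]
  rw [PySem.Dict.getD_insert_self, PySem.Dict.insert_insert_self]
  exact PySem.Dict.items_insert_of_not_contains g _ h

-- one A-step on a seen key rewrites items pointwise, appending row at the key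
lemma pvAStep_items_seen (group_col : String) (g : PySem.Dict (Option String) (List (List (String × String))))
    (row : List (String × String)) (h : g.contains (List.lookup group_col row) = true) :
    (pvAStep group_col g row).items =
      g.items.map (fun p => if p.1 == List.lookup group_col row then
        (List.lookup group_col row, g.getD (List.lookup group_col row) [] ++ [row]) else p) := by
  simp only [pvAStep, PySem.Dict.modify, h, if_true]
  exact PySem.Dict.items_insert_of_contains g _ h

lemma pvFin_append (l : List (Option String × List (List (String × String))))
    (x : Option String × List (List (String × String))) :
    pvFin (l ++ [x]) = pvFinStep (pvFin l) x := by
  unfold pvFin; rw [List.foldl_append]; rfl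

-- rewriting the seen key's group pointwise changes neither keys nor pvFin
lemma pvFin_map_seen (g : PySem.Dict (Option String) (List (List (String × String))))
    (key : Option String) (row : List (String × String))
    (hnd : g.keys.Nodup) (hne : ∀ p ∈ g.items, p.2 ≠ []) :
    pvFin (g.items.map (fun p => if p.1 == key then (key, g.getD key [] ++ [row]) else p)) = pvFin g.items := by
  unfold pvFin
  rw [List.foldl_map]
  apply PySem.List.foldl_congr_mem
  intro acc p hp
  by_cases hk : p.1 = key
  · have hget : g.get? p.1 = some p.2 := PySem.Dict.get?_of_mem_items g (by exact hp) hnd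
    have hgd : g.getD key [] = p.2 := by
      rw [← hk]; simp [PySem.Dict.getD, hget]
    rcases hcons : p.2 with _ | ⟨r, rs⟩
    · exact absurd hcons (hne p hp)
    · simp [pvFinStep, hk, hgd, hcons]
  · simp [beq_eq_false_iff_ne.mpr hk]

lemma pvFin_map_seen_keys (g : PySem.Dict (Option String) (List (List (String × String))))
    (key : Option String) (row : List (String × String)) :
    (g.items.map (fun p => if p.1 == key then (key, g.getD key [] ++ [row]) else p)).map (·.1) = g.keys := by
  have : ∀ p : Option String × List (List (String × String)),
      ((if p.1 == key then (key, g.getD key [] ++ [row]) else p)).1 = p.1 := by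
    intro p
    by_cases hk : p.1 = key
    · simp [hk]
    · simp [beq_eq_false_iff_ne.mpr hk]
  simp only [PySem.Dict.keys, List.map_map]
  exact List.map_congr_left (fun p _ => this p)

-- main loop invariant: B's state is (keys of A's dict, pvFin of its items)
lemma pv_loop (group_col : String) :
    ∀ (rest : List (List (String × String)))
      (g : PySem.Dict (Option String) (List (List (String × String)))),
      g.keys.Nodup → (∀ p ∈ g.items, p.2 ≠ []) →
      rest.foldl (pvBStep group_col) (g.keys, pvFin g.items)
        = ((rest.foldl (pvAStep group_col) g).keys,
           pvFin (rest.foldl (pvAStep group_col) g).items) := by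
  intro rest
  induction rest with
  | nil => intro g _ _; rfl
  | cons row rest ih =>
    intro g hnd hne
    simp only [List.foldl_cons]
    have hmem : PySem.Set.contains g.keys (List.lookup group_col row) = g.contains (List.lookup group_col row) := by
      unfold PySem.Set.contains
      by_cases h : g.contains (List.lookup group_col row) = true
      · simp [h, List.contains_eq_mem, (PySem.Dict.contains_iff_mem_keys g _).1 h]
      · have h' : g.contains (List.lookup group_col row) = false := by simpa using h
        have hnm : (List.lookup group_col row) ∉ g.keys := fun hm => h ((PySem.Dict.contains_iff_mem_keys g _).2 hm)
        simp [h', List.contains_eq_mem, hnm]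
    have hstep : pvBStep group_col (g.keys, pvFin g.items) row
        = ((pvAStep group_col g row).keys, pvFin (pvAStep group_col g row).items) ∧
        (pvAStep group_col g row).keys.Nodup ∧
        (∀ p ∈ (pvAStep group_col g row).items, p.2 ≠ []) := by
      by_cases hc : g.contains (List.lookup group_col row) = true
      · -- seen key: B skips; A rewrites the group in place, head unchanged
        have hitems := pvAStep_items_seen group_col g row hc
        have hkeys : (pvAStep group_col g row).keys = g.keys := by
          simp only [PySem.Dict.keys, hitems]
          exact pvFin_map_seen_keys g _ row
        refine ⟨?_, by rw [hkeys]; exact hnd, ?_⟩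
        · have hfin : pvFin (pvAStep group_col g row).items = pvFin g.items := by
            rw [hitems]; exact pvFin_map_seen g _ row hnd hne
          rw [hfin, hkeys]
          unfold pvBStep
          rw [if_pos (by simp only []; rw [hmem]; exact hc)]
        · intro p hp
          rw [hitems] at hp
          rcases List.mem_map.1 hp with ⟨q, hq, hqe⟩
          by_cases hk : q.1 == List.lookup group_col row
          · simp only [hk, if_true] at hqe
            rw [← hqe]; simp
          · simp only [hk] at hqe
            simp only [Bool.false_eq_true, if_false] at hqe
            rw [← hqe]; exact hne q hq
      · -- fresh key: B appends the row; A appends the singleton group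
        have hc' : g.contains (List.lookup group_col row) = false := by simpa using hc
        have hitems := pvAStep_items_fresh group_col g row hc'
        have hnm : (List.lookup group_col row) ∉ g.keys :=
          fun hm => hc ((PySem.Dict.contains_iff_mem_keys g _).2 hm)
        have hkeys : (pvAStep group_col g row).keys = g.keys ++ [List.lookup group_col row] := by
          simp [PySem.Dict.keys, hitems]
        refine ⟨?_, ?_, ?_⟩
        · have hfin : pvFin (pvAStep group_col g row).items = pvFin g.items ++ [row] := by
            rw [hitems, pvFin_append]; rfl
          rw [hfin, hkeys]
          unfold pvBStep
          rw [if_neg (by simp only []; rw [hmem, hc']; simp)]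
          have hadd : PySem.Set.add g.keys (List.lookup group_col row)
              = g.keys ++ [List.lookup group_col row] := by
            unfold PySem.Set.add
            rw [if_neg (by rw [hmem, hc']; simp)]
          simp only []
          rw [hadd]
        · rw [hkeys]
          simp only [List.nodup_append, List.nodup_singleton]
          refine ⟨hnd, trivial, ?_⟩
          intro a ha b hb
          simp only [List.mem_singleton] at hb
          intro he
          rw [he, hb] at ha
          exact hnm ha
        · intro p hp
          rw [hitems] at hp
          rcases List.mem_append.1 hp with h1 | h1
          · exact hne p h1
          · simp only [List.mem_singleton] at h1
            rw [h1]; simp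
    rw [hstep.1]
    exact ih (pvAStep group_col g row) hstep.2.1 hstep.2.2

-- ===== VERDICT (by name: the statement is the Claim_ definition above) =====
theorem handle_group_by_py_spec : Claim_equal_handle_group_by_py := by
  intro data group_col _
  unfold Spec_handle_group_by_py handle_group_by_py handle_group_by_py_alt
  by_cases hd : data = []
  · simp [hd]
  · rw [if_neg hd, if_neg hd]
    have hA : data.foldl
        (fun g row =>
          let key := List.lookup group_col row
          let g1 := if g.contains key then g else g.insert key []
          g1.modify key [] (fun rows => rows ++ [row]))
        PySem.Dict.empty = data.foldl (pvAStep group_col) PySem.Dict.empty := rfl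
    have hB : data.foldl
        (fun (st : PySem.Set (Option String) × List (List (String × String))) row =>
          let key := List.lookup group_col row
          if st.1.contains key then st
          else (st.1.add key, st.2 ++ [row]))
        (PySem.Set.empty, []) = data.foldl (pvBStep group_col) (PySem.Set.empty, []) := rfl
    rw [hB]
    have h0 := pv_loop group_col data PySem.Dict.empty (by simp [PySem.Dict.keys_empty])
      (by intro p hp; simp [PySem.Dict.empty] at hp)
    have hkE : (PySem.Dict.empty : PySem.Dict (Option String) (List (List (String × String)))).keys = [] :=
      PySem.Dict.keys_empty
    have hfE : pvFin (PySem.Dict.empty : PySem.Dict (Option String) (List (List (String × String)))).items = [] := rfl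
    rw [hkE, hfE] at h0
    have : (PySem.Set.empty : PySem.Set (Option String)) = ([] : List (Option String)) := rfl
    rw [this, h0]
    rfl
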